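-- pv_equiv track=rewrite | github.com/Dxyk/CodeWars | kyu_5/RGB_hex_converter.py | rgb
-- ===== SOURCE A (Python) =====
-- def rgb(r, g, b):
--     """
--     Convert decimal rgb to hexadecimal. Each range from 0-255. Out of range
--     value rounded to nearest.
--     :param r: red, decimal
--     :type r: int
--     :param g: green, decimal
--     :type g: int
--     :param b: blue, decimal
--     :type b: int
--     :return: hexadecimal representation of three color combined
--     :rtype: str
--
--     >>> rgb(0, 0, 0)
--     '000000'
--     >>> rgb(1, 2, 3)
--     '010203'
--     >>> rgb(255, 255, 255)
--     'FFFFFF'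
--     >>> rgb(254,253,252)
--     'FEFDFC'
--     >>> rgb(-20,275,125)
--     '00FF7D'
--     """
--     result = ''
--     l = [[x // 16 % 16, x % 16] if 0 <= x <= 255
--          else ([0, 0] if x < 0 else [15, 15])
--          for x in [r, g, b]]
--     for a in l:
--         for c in a:
--             result += str(c) if c < 10 else chr(55 + c)
--     return result
-- ===== SOURCE B (Python) =====
-- def rgb(r, g, b):
--     return ''.join('{:02X}'.format(max(0, min(255, x))) for x in (r, g, b))
-- ===== Notes on version B (the rewrite author's own statement) =====
-- stated objective: simpler
-- what changed: Replaces the three-way range branch and the nested loop doing manual base-16 digit arithmetic (chr(55+c)) with a clamp max(0,min(255,x)) and one '{:02X}' format call per channel.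
import Mathlib
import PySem

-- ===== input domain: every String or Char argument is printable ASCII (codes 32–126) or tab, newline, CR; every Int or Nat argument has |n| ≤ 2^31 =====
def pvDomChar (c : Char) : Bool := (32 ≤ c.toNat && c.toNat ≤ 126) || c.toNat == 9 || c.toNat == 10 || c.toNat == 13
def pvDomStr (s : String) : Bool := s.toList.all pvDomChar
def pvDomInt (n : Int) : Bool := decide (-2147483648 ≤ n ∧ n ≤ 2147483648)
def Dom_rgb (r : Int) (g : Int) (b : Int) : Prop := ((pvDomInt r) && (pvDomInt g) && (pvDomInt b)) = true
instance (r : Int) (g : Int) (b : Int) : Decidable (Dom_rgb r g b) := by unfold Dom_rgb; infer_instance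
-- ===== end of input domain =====

-- B: clamp each channel with max/min and format '{:02X}' per channel instead of the three-way branch and manual nibble digits (objective: simpler).
-- ===== PORT A =====
-- A-side helper: str(c) if c < 10 else chr(55 + c)
def pvDigA (c : Int) : String :=
  if c < 10 then PySem.Int.toStr c else String.mk [Char.ofNat (55 + c).toNat]

def rgb (r : Int) (g : Int) (b : Int) : String :=
  let l := [r, g, b].map (fun x =>
    if 0 ≤ x ∧ x ≤ 255 then [PySem.Int.mod (PySem.Int.floordiv x 16) 16, PySem.Int.mod x 16]
    else (if x < 0 then [(0 : Int), 0] else [15, 15]))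
  l.foldl (fun result a => a.foldl (fun result c => result ++ pvDigA c) result) ""

-- ===== PORT B =====
-- B-side helper: port of '{:02X}'.format(n) for 0 ≤ n ≤ 255 (uppercase, width 2, zero-padded)
def pvHexChar (d : Nat) : Char :=
  if d < 10 then Char.ofNat (48 + d) else Char.ofNat (55 + d)

def pvFmt02X (n : Int) : String :=
  String.mk [pvHexChar (n.toNat / 16), pvHexChar (n.toNat % 16)]

def rgb_alt (r : Int) (g : Int) (b : Int) : String :=
  String.join ([r, g, b].map (fun x => pvFmt02X (max 0 (min 255 x))))

-- ===== PRECONDITION & SPEC =====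
def Spec_rgb (r : Int) (g : Int) (b : Int) (out : String) : Prop := out = rgb_alt r g b
instance (r : Int) (g : Int) (b : Int) (out : String) : Decidable (Spec_rgb r g b out) := by unfold Spec_rgb; infer_instance

-- ===== CLAIM (what is proved, stated in full; the proofs are below) =====
def Claim_equal_rgb : Prop := ∀ (r : Int) (g : Int) (b : Int), Dom_rgb r g b → Spec_rgb r g b (rgb r g b)

-- ===== LEMMAS AND PROOFS =====

-- ===== VERDICT (by name: the statement is the Claim_ definition above) =====
-- digit-level agreement on the in-range nibble pairs, by exhaustive check
set_option maxRecDepth 4000 in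
theorem pvKey : ∀ n : Nat, n < 256 →
    pvDigA (PySem.Int.mod (PySem.Int.floordiv (n : Int) 16) 16) ++ pvDigA (PySem.Int.mod (n : Int) 16)
      = pvFmt02X (n : Int) := by decide

theorem pvChanA_eq (s0 : String) (x : Int) :
    (if 0 ≤ x ∧ x ≤ 255 then [PySem.Int.mod (PySem.Int.floordiv x 16) 16, PySem.Int.mod x 16]
     else (if x < 0 then [(0 : Int), 0] else [15, 15])).foldl (fun result c => result ++ pvDigA c) s0
      = s0 ++ pvFmt02X (max 0 (min 255 x)) := by
  split_ifs with h1 h2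
  · obtain ⟨hl, hr⟩ := h1
    obtain ⟨n, rfl⟩ := Int.eq_ofNat_of_zero_le hl
    have hn : n < 256 := by exact_mod_cast Int.lt_add_one_iff.mpr hr
    have hc : max 0 (min 255 ((n : Int))) = (n : Int) := by omega
    simp only [List.foldl, hc, String.append_assoc]
    rw [pvKey n hn]
  · have hc : max 0 (min 255 x) = 0 := by omega
    simp only [List.foldl, hc, String.append_assoc]
    congr 1
  · have hc : max 0 (min 255 x) = 255 := by omega
    simp only [List.foldl, hc, String.append_assoc]
    congr 1

theorem rgb_spec : Claim_equal_rgb := by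
  intro r g b _
  unfold Spec_rgb rgb rgb_alt
  simp only [List.map, List.foldl, String.join]
  rw [pvChanA_eq, pvChanA_eq, pvChanA_eq]
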